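-- pv_equiv track=rewrite | github.com/JonathanMortal16/AI-Jonathan-Mercado | 001_Busqueda_grafos/003_Satisfaccion_de_restricciones/001_Problemas_de_Satisfaccion_de_Restricciones.py | es_consistente
-- ===== SOURCE A (Python) =====
-- restricciones_vecinos = [
--     ("A", "B"),
--     ("B", "C"),
--     ("A", "C")
-- ]
--
-- def es_consistente(asignacion_parcial, var_actual, valor_actual):
--     """
--     Revisa si asignar 'valor_actual' a 'var_actual' rompe alguna restricción
--     con lo que ya está asignado.
--
--     asignacion_parcial: dict con asignaciones actuales, ej: {"A":"Rojo", "B":"Verde"}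
--     var_actual: la variable que estamos intentando asignar ahora, ej: "C"
--     valor_actual: el valor que queremos probar, ej: "Azul"
--     """
--
--     # Recorremos todas las restricciones del tipo X != Y
--     for (x, y) in restricciones_vecinos:
--         # Caso 1: var_actual es x, checar contra y
--         if x == var_actual and y in asignacion_parcial:
--             # Si el vecino ya tiene el mismo color, NO es consistente
--             if asignacion_parcial[y] == valor_actual:
--                 return False
--
--         # Caso 2: var_actual es y, checar contra x
--         if y == var_actual and x in asignacion_parcial:
--             if asignacion_parcial[x] == valor_actual:
--                 return False
--
--     # Si no violó ninguna restricción, es consistente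
--     return True
-- ===== SOURCE B (Python) =====
-- # B: the constraint list is the COMPLETE graph on {"A","B","C"}, so var_actual's
-- # neighbors are exactly the OTHER graph variables.  Instead of scanning
-- # constraints (or neighbors) and looking assignments up, B makes one pass over
-- # the assignment itself: inconsistent iff some other graph variable already
-- # holds valor_actual.
-- _VARS = ("A", "B", "C")
--
-- def es_consistente(asignacion_parcial, var_actual, valor_actual):
--     if var_actual not in _VARS:
--         return True  # var_actual appears in no constraint
--     return all(valor != valor_actual or var == var_actual or var not in _VARS
--                for var, valor in asignacion_parcial.items())
-- ===== Notes on version B (the rewrite author's own statement) =====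
-- stated objective: alternative
-- what changed: B exploits that the constraint list is the complete graph on {A,B,C}: instead of scanning constraint pairs and doing per-neighbor dict lookups, it makes one pass over the assignment items and rejects iff some other graph variable already holds valor_actual.
import Mathlib
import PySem

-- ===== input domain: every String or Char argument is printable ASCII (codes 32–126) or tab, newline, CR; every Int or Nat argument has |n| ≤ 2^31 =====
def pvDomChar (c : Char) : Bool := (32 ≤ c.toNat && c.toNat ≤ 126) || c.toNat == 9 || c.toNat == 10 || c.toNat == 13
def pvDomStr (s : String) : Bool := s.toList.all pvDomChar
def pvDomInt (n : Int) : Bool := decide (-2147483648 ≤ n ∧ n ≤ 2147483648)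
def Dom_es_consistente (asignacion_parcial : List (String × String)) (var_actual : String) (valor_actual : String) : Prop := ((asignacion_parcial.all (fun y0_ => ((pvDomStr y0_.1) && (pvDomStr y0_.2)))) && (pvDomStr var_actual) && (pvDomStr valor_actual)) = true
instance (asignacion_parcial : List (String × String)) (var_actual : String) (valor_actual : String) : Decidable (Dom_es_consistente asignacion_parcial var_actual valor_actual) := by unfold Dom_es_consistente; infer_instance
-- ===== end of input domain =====

-- B uses that the constraint list is the complete graph on {"A","B","C"}: one pass over the
-- assignment items (no constraint scan, no lookups) instead of A's two-orientation scan of all pairs.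

-- ===== PORT A =====
def restricciones_vecinos : List (String × String) := [("A", "B"), ("B", "C"), ("A", "C")]

-- the 'for (x, y) in restricciones_vecinos' loop of A, with its two orientation checks
def pvALoop (pares : List (String × String)) (asignacion_parcial : List (String × String)) (var_actual : String) (valor_actual : String) : Bool :=
  match pares with
  | [] => true
  | (x, y) :: rest =>
    if x = var_actual ∧ ((PySem.Dict.mk asignacion_parcial).get? y).isSome ∧
        (PySem.Dict.mk asignacion_parcial).get? y = some valor_actual then false
    else if y = var_actual ∧ ((PySem.Dict.mk asignacion_parcial).get? x).isSome ∧
        (PySem.Dict.mk asignacion_parcial).get? x = some valor_actual then false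
    else pvALoop rest asignacion_parcial var_actual valor_actual

def es_consistente (asignacion_parcial : List (String × String)) (var_actual : String) (valor_actual : String) : Bool :=
  pvALoop restricciones_vecinos asignacion_parcial var_actual valor_actual

-- ===== PORT B =====
-- port of B's tuple-membership test 's in _VARS'
def pvEnVars (s : String) : Bool := s == "A" || s == "B" || s == "C"

-- B: 'if var_actual not in _VARS: return True' then 'all(...)' over the dict's items
-- ((PySem.Dict.mk ap).items is definitionally the association list itself)
def es_consistente_alt (asignacion_parcial : List (String × String)) (var_actual : String) (valor_actual : String) : Bool :=
  if pvEnVars var_actual = false then true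
  else ((PySem.Dict.mk asignacion_parcial).items).all
    (fun p => !(p.2 == valor_actual) || p.1 == var_actual || !pvEnVars p.1)

-- ===== PRECONDITION & SPEC =====
-- Pre_ excludes association lists with duplicate keys: those cannot arise from the Python dict
-- the function receives, and on them first-match lookup vs full-scan behaviour is accidental.
def Pre_es_consistente (asignacion_parcial : List (String × String)) (var_actual : String) (valor_actual : String) : Prop :=
  (asignacion_parcial.map Prod.fst).Nodup
instance (asignacion_parcial : List (String × String)) (var_actual : String) (valor_actual : String) : Decidable (Pre_es_consistente asignacion_parcial var_actual valor_actual) := by unfold Pre_es_consistente; infer_instance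

def pvWitness_es_consistente : (List (String × String)) × String × String := ([("A", "Rojo"), ("C", "Verde")], "B", "Verde")

def Spec_es_consistente (asignacion_parcial : List (String × String)) (var_actual : String) (valor_actual : String) (out : Bool) : Prop := out = es_consistente_alt asignacion_parcial var_actual valor_actual
instance (asignacion_parcial : List (String × String)) (var_actual : String) (valor_actual : String) (out : Bool) : Decidable (Spec_es_consistente asignacion_parcial var_actual valor_actual out) := by unfold Spec_es_consistente; infer_instance

-- ===== CLAIM (what is proved, stated in full; the proofs are below) =====
def Claim_equal_es_consistente : Prop := ∀ (asignacion_parcial : List (String × String)) (var_actual : String) (valor_actual : String), Dom_es_consistente asignacion_parcial var_actual valor_actual → Pre_es_consistente asignacion_parcial var_actual valor_actual → Spec_es_consistente asignacion_parcial var_actual valor_actual (es_consistente asignacion_parcial var_actual valor_actual)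

-- ===== LEMMAS AND PROOFS =====

-- under unique keys, first-match lookup is membership
theorem pv_get?_iff (ap : List (String × String)) (k v : String)
    (hnd : (ap.map Prod.fst).Nodup) :
    (PySem.Dict.mk ap).get? k = some v ↔ (k, v) ∈ ap := by
  have h : ((PySem.Dict.mk ap).keys).Nodup := hnd
  exact PySem.Dict.get?_eq_some_iff_mem_items (PySem.Dict.mk ap) k v h

-- B's scan is true iff no other graph variable is assigned valor_actual
theorem pv_all_true_iff (ap : List (String × String)) (var val : String) :
    (ap.all (fun p => !(p.2 == val) || p.1 == var || !pvEnVars p.1) = true) ↔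
    ∀ p ∈ ap, p.2 = val → p.1 ≠ var → pvEnVars p.1 = false := by
  rw [List.all_eq_true]
  constructor
  · intro h p hp hv hnv
    have := h p hp
    simp only [Bool.or_eq_true, Bool.not_eq_true', beq_iff_eq, beq_eq_false_iff_ne] at this
    rcases this with (h1 | h1) | h1
    · exact absurd hv h1
    · exact absurd h1 hnv
    · exact h1
  · intro h p hp
    simp only [Bool.or_eq_true, Bool.not_eq_true', beq_iff_eq, beq_eq_false_iff_ne]
    by_cases hv : p.2 = val
    · by_cases hk : p.1 = var
      · exact Or.inl (Or.inr hk)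
      · exact Or.inr (h p hp hv hk)
    · exact Or.inl (Or.inl hv)

-- one var ∈ {"A","B","C"} case of the verdict: A checks exactly the two other
-- variables n₁, n₂; B's scan fails exactly on an item (n₁, val) or (n₂, val)
theorem pv_case (ap : List (String × String)) (var val n₁ n₂ : String)
    (hnd : (ap.map Prod.fst).Nodup)
    (hA : pvALoop restricciones_vecinos ap var val =
      !(decide ((PySem.Dict.mk ap).get? n₁ = some val) ||
        decide ((PySem.Dict.mk ap).get? n₂ = some val)))
    (hvars : ∀ s : String, pvEnVars s = true ↔ s = var ∨ s = n₁ ∨ s = n₂)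
    (hn₁ : n₁ ≠ var) (hn₂ : n₂ ≠ var) :
    pvALoop restricciones_vecinos ap var val =
      ap.all (fun p => !(p.2 == val) || p.1 == var || !pvEnVars p.1) := by
  rw [hA]
  by_cases h1 : (n₁, val) ∈ ap
  · have : (PySem.Dict.mk ap).get? n₁ = some val := (pv_get?_iff ap n₁ val hnd).mpr h1
    rw [this]
    simp only [decide_eq_true_eq, decide_true, Bool.true_or, Bool.not_true]
    symm
    rw [Bool.eq_false_iff]
    intro hall
    have h' := (pv_all_true_iff ap var val).mp hall (n₁, val) h1 rfl hn₁
    have : pvEnVars n₁ = true := (hvars n₁).mpr (Or.inr (Or.inl rfl))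
    simp only [this] at h'
    exact absurd h' (by simp)
  · by_cases h2 : (n₂, val) ∈ ap
    · have : (PySem.Dict.mk ap).get? n₂ = some val := (pv_get?_iff ap n₂ val hnd).mpr h2
      rw [this]
      simp only [decide_eq_true_eq, decide_true, Bool.or_true, Bool.not_true]
      symm
      rw [Bool.eq_false_iff]
      intro hall
      have h' := (pv_all_true_iff ap var val).mp hall (n₂, val) h2 rfl hn₂
      have : pvEnVars n₂ = true := (hvars n₂).mpr (Or.inr (Or.inr rfl))
      simp only [this] at h'
      exact absurd h' (by simp)
    · have e1 : ¬ (PySem.Dict.mk ap).get? n₁ = some val := fun h => h1 ((pv_get?_iff ap n₁ val hnd).mp h)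
      have e2 : ¬ (PySem.Dict.mk ap).get? n₂ = some val := fun h => h2 ((pv_get?_iff ap n₂ val hnd).mp h)
      simp only [e1, e2, decide_false, Bool.or_false, Bool.not_false]
      symm
      rw [pv_all_true_iff]
      intro p hp hv hk
      rw [Bool.eq_false_iff]
      intro hin
      rcases (hvars p.1).mp hin with h | h | h
      · exact hk h
      · exact h1 (by rw [← h, ← hv]; exact hp)
      · exact h2 (by rw [← h, ← hv]; exact hp)

-- ===== VERDICT (by name: the statement is the Claim_ definition above) =====
theorem es_consistente_spec : Claim_equal_es_consistente := by
  intro ap var val _ hnd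
  unfold Spec_es_consistente es_consistente es_consistente_alt
  by_cases hA : var = "A"
  · subst hA
    rw [if_neg (by simp [pvEnVars])]
    exact pv_case ap "A" val "B" "C" hnd
      (by by_cases hB : (PySem.Dict.mk ap).get? "B" = some val <;>
            by_cases hC : (PySem.Dict.mk ap).get? "C" = some val <;>
              simp [pvALoop, restricciones_vecinos, hB, hC])
      (by intro s; simp [pvEnVars]; tauto)
      (by decide) (by decide)
  · by_cases hB : var = "B"
    · subst hB
      rw [if_neg (by simp [pvEnVars])]
      exact pv_case ap "B" val "A" "C" hnd
        (by by_cases h1 : (PySem.Dict.mk ap).get? "A" = some val <;>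
              by_cases h2 : (PySem.Dict.mk ap).get? "C" = some val <;>
                simp [pvALoop, restricciones_vecinos, h1, h2])
        (by intro s; simp [pvEnVars]; tauto)
        (by decide) (by decide)
    · by_cases hC : var = "C"
      · subst hC
        rw [if_neg (by simp [pvEnVars])]
        exact pv_case ap "C" val "A" "B" hnd
          (by by_cases h1 : (PySem.Dict.mk ap).get? "A" = some val <;>
                by_cases h2 : (PySem.Dict.mk ap).get? "B" = some val <;>
                  simp [pvALoop, restricciones_vecinos, h1, h2])
          (by intro s; simp [pvEnVars]; tauto)
          (by decide) (by decide)
      · have hA' : "A" ≠ var := fun h => hA h.symm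
        have hB' : "B" ≠ var := fun h => hB h.symm
        have hC' : "C" ≠ var := fun h => hC h.symm
        rw [if_pos (by
          simp only [pvEnVars, Bool.or_eq_false_iff, beq_eq_false_iff_ne]
          exact ⟨⟨hA'.symm, hB'.symm⟩, hC'.symm⟩)]
        simp [pvALoop, restricciones_vecinos, hA', hB', hC']
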